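-- pv_equiv track=rewrite | github.com/RoyHaoXu/Social-Listeninig | src/data_processing.py | _strip_all_entities
-- ===== SOURCE A (Python) =====
-- import string
--
-- def _strip_all_entities(text):
--     """Helper to delete all the @ and hashtags from text."""
--     entity_prefixes = ['@', '#']
--     for separator in string.punctuation:
--         if separator not in entity_prefixes:
--             text = text.replace(separator, ' ')
--     words = []
--     for word in text.split():
--         word = word.strip()
--         if word:
--             if word[0] not in entity_prefixes:
--                 words.append(word)
--     return ' '.join(words)
-- ===== SOURCE B (Python) =====
-- import string
--
-- def _strip_all_entities(text):
--     """Single linear scan: split on whitespace/punctuation (except @ and #), drop @/#-prefixed tokens."""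
--     delims = set(string.whitespace) | (set(string.punctuation) - {'@', '#'})
--     words = []
--     cur = []
--     for ch in text:
--         if ch in delims:
--             if cur and cur[0] not in ('@', '#'):
--                 words.append(''.join(cur))
--             cur = []
--         else:
--             cur.append(ch)
--     if cur and cur[0] not in ('@', '#'):
--         words.append(''.join(cur))
--     return ' '.join(words)
-- ===== Notes on version B (the rewrite author's own statement) =====
-- stated objective: alternative
-- what changed: Replaced A's 32-pass replace-each-punctuation loop followed by split() and a filtering pass with a single linear scan over the characters that maintains a token buffer and flushes non-@/#-prefixed tokens.
import Mathlib
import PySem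

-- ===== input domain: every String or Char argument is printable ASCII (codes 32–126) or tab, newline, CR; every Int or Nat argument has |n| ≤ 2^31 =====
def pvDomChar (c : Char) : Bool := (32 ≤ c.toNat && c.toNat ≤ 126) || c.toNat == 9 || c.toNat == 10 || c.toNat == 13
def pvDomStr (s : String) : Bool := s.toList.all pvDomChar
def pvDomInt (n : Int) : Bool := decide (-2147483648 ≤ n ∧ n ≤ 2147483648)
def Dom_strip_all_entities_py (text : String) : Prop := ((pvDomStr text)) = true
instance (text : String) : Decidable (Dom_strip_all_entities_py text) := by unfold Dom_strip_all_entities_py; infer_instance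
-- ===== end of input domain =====

-- B replaces A's 32-pass replace-punctuation loop + split + filter pipeline by one linear scan with a token buffer (objective: alternative).

-- ===== PORT A =====
-- string.punctuation
def aPunct : List Char := "!\"#$%&'()*+,-./:;<=>?@[\\]^_`{|}~".toList
def aPrefixes : List Char := ['@', '#']

def strip_all_entities_py (text : String) : String :=
  let t := aPunct.foldl (fun t sep =>
    if sep ∈ aPrefixes then t else PySem.Str.replace t (String.ofList [sep]) " ") text
  let words := (PySem.Str.split₀ t).foldl (fun ws w =>
    let w := PySem.Str.strip w
    if w ≠ "" then
      match PySem.Str.pyGet? w 0 with      -- word[0]; the guard w ≠ "" makes it total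
      | some c => if c ∈ aPrefixes then ws else ws ++ [w]
      | none => ws
    else ws) []
  PySem.Str.join " " words

-- ===== PORT B =====
-- string.whitespace and string.punctuation
def bWhitespace : List Char := [' ', '\t', '\n', '\r', '\x0b', '\x0c']
def bPunct : List Char := "!\"#$%&'()*+,-./:;<=>?@[\\]^_`{|}~".toList
-- delims = set(string.whitespace) | (set(string.punctuation) - {'@', '#'})
def bDelims : PySem.Set Char :=
  PySem.Set.union (PySem.Set.ofList bWhitespace)
    (PySem.Set.diff (PySem.Set.ofList bPunct) (PySem.Set.ofList ['@', '#']))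

-- cur and cur[0] not in ('@', '#')
def bKeep (cur : List Char) : Bool :=
  match cur with
  | [] => false
  | c :: _ => !(c == '@' || c == '#')

def bFlush (words : List String) (cur : List Char) : List String :=
  if bKeep cur then words ++ [String.ofList cur] else words

def strip_all_entities_py_alt (text : String) : String :=
  let st := text.toList.foldl (fun (st : List String × List Char) ch =>
    if PySem.Set.contains bDelims ch then (bFlush st.1 st.2, [])
    else (st.1, st.2 ++ [ch])) ([], [])
  PySem.Str.join " " (bFlush st.1 st.2)

-- ===== PRECONDITION & SPEC =====
def Spec_strip_all_entities_py (text : String) (out : String) : Prop := out = strip_all_entities_py_alt text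
instance (text : String) (out : String) : Decidable (Spec_strip_all_entities_py text out) := by unfold Spec_strip_all_entities_py; infer_instance

-- ===== CLAIM (what is proved, stated in full; the proofs are below) =====
def Claim_equal_strip_all_entities_py : Prop := ∀ (text : String), Dom_strip_all_entities_py text → Spec_strip_all_entities_py text (strip_all_entities_py text)

-- ===== LEMMAS AND PROOFS =====

-- "is a delimiter": whitespace or punctuation other than @/# (Bool predicate used by the proofs)
def pdB (c : Char) : Bool := decide (c ∈ aPunct) && !decide (c ∈ aPrefixes)
def Dl (c : Char) : Bool := PySem.Chars.isspace c || pdB c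
-- the character substitution A's replace loop performs
def subst (c : Char) : Char := if pdB c then ' ' else c

-- tokenisation of cs with pending buffer cur, delimiters = Dl
def toks : List Char → List Char → List (List Char)
  | cur, [] => if cur.isEmpty then [] else [cur]
  | cur, c :: cs =>
    if Dl c then (if cur.isEmpty then toks [] cs else cur :: toks [] cs)
    else toks (cur ++ [c]) cs

lemma char_eq_iff_toNat (c d : Char) : c = d ↔ c.toNat = d.toNat := by
  constructor
  · rintro rfl; rfl
  · intro h; have := congrArg Char.ofNat h; simpa [Char.ofNat_toNat] using this

-- single-char replace is a map
lemma replace_go_single (a r : Char) :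
    ∀ (fuel : Nat) (cs acc : List Char), cs.length ≤ fuel →
      PySem.Chars.replace.go [a] [r] fuel cs acc
        = acc.reverse ++ cs.map (fun c => if c = a then r else c) := by
  intro fuel
  induction fuel with
  | zero => intro cs acc h; cases cs with
    | nil => simp [PySem.Chars.replace.go]
    | cons c t => simp at h
  | succ n ih =>
    intro cs acc h
    cases cs with
    | nil => simp [PySem.Chars.replace.go]
    | cons c t =>
      simp only [PySem.Chars.replace.go]
      by_cases hca : c = a
      · subst hca
        have hp : List.isPrefixOf [c] (c :: t) = true := by simp [List.isPrefixOf]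
        rw [if_pos hp]
        rw [ih _ _ (by simpa using Nat.le_of_succ_le_succ h)]
        simp
      · have hp : List.isPrefixOf [a] (c :: t) = false := by
          simp [List.isPrefixOf]; exact fun h' => absurd h'.symm hca
        rw [if_neg (by simp [hp])]
        rw [ih _ _ (by simpa using Nat.le_of_succ_le_succ h)]
        simp [hca]

lemma replace_single (cs : List Char) (a r : Char) :
    PySem.Chars.replace cs [a] [r] = cs.map (fun c => if c = a then r else c) := by
  simp [PySem.Chars.replace, replace_go_single a r cs.length cs [] (le_refl _)]

-- a fold of maps is a map of folds
lemma foldl_map_comp {α : Type} (g : α → Char → Char) :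
    ∀ (l : List α) (cs : List Char),
      l.foldl (fun t a => t.map (g a)) cs = cs.map (fun c => l.foldl (fun c a => g a c) c) := by
  intro l
  induction l with
  | nil => intro cs; simp
  | cons a l ih => intro cs; simp [ih, List.map_map]

-- folding the per-character step over any list of punctuation chars not containing the space
lemma charFold_general :
    ∀ (l : List Char) (c : Char), ' ' ∉ l →
      l.foldl (fun c sep => if sep ∈ aPrefixes then c else if c = sep then ' ' else c) c
        = if c ∈ l ∧ c ∉ aPrefixes then ' ' else c := by
  intro l
  induction l with
  | nil => intro c _; simp
  | cons s l ih =>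
    intro c hsp
    have hsp' : ' ' ∉ l := fun h => hsp (List.mem_cons_of_mem _ h)
    simp only [List.foldl_cons]
    by_cases hse : s ∈ aPrefixes
    · rw [if_pos hse, ih c hsp']
      by_cases hc : c ∈ l ∧ c ∉ aPrefixes
      · rw [if_pos hc, if_pos ⟨List.mem_cons_of_mem _ hc.1, hc.2⟩]
      · rw [if_neg hc, if_neg]
        rintro ⟨hm, hnp⟩
        rcases List.mem_cons.mp hm with rfl | hm
        · exact hnp hse
        · exact hc ⟨hm, hnp⟩
    · rw [if_neg hse]
      by_cases hcs : c = s
      · subst hcs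
        rw [if_pos rfl, ih ' ' hsp']
        have : ¬ (' ' ∈ l ∧ ' ' ∉ aPrefixes) := fun h => hsp' h.1
        rw [if_neg this, if_pos ⟨List.mem_cons_self, hse⟩]
      · rw [if_neg hcs, ih c hsp']
        have : (c ∈ s :: l ∧ c ∉ aPrefixes) ↔ (c ∈ l ∧ c ∉ aPrefixes) := by
          constructor
          · rintro ⟨hm, hnp⟩
            rcases List.mem_cons.mp hm with rfl | hm
            · exact absurd rfl hcs
            · exact ⟨hm, hnp⟩
          · rintro ⟨hm, hnp⟩; exact ⟨List.mem_cons_of_mem _ hm, hnp⟩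
        simp only [this]

-- A's replace loop, at the character level, is map subst
lemma replace_fold_eq_map (cs : List Char) :
    aPunct.foldl (fun cs sep =>
        if sep ∈ aPrefixes then cs else PySem.Chars.replace cs [sep] [' ']) cs
      = cs.map subst := by
  have h1 : ∀ (t : List Char) (sep : Char),
      (if sep ∈ aPrefixes then t else PySem.Chars.replace t [sep] [' '])
        = t.map (fun c => if sep ∈ aPrefixes then c else if c = sep then ' ' else c) := by
    intro t sep
    by_cases hs : sep ∈ aPrefixes
    · simp [hs]
    · simp [hs, replace_single]
  rw [PySem.List.foldl_congr_mem _ _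
      (fun t sep => t.map (fun c => if sep ∈ aPrefixes then c else if c = sep then ' ' else c)) _
      (fun t sep _ => h1 t sep)]
  rw [foldl_map_comp]
  apply List.map_congr_left
  intro c _
  rw [charFold_general aPunct c (by decide)]
  simp only [subst, pdB]
  by_cases h : c ∈ aPunct ∧ c ∉ aPrefixes
  · rw [if_pos h, if_pos (by simp [h.1, h.2])]
  · rw [if_neg h, if_neg]
    simp only [Bool.and_eq_true, decide_eq_true_iff, Bool.not_eq_true', decide_eq_false_iff_not]
    exact h

-- lifting the string-level fold of A to the character level
lemma foldA_toList (text : String) :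
    (aPunct.foldl (fun t sep =>
        if sep ∈ aPrefixes then t else PySem.Str.replace t (String.ofList [sep]) " ") text).toList
      = aPunct.foldl (fun cs sep =>
        if sep ∈ aPrefixes then cs else PySem.Chars.replace cs [sep] [' ']) text.toList := by
  have : ∀ (l : List Char) (s : String),
      (l.foldl (fun t sep =>
        if sep ∈ aPrefixes then t else PySem.Str.replace t (String.ofList [sep]) " ") s).toList
      = l.foldl (fun cs sep =>
        if sep ∈ aPrefixes then cs else PySem.Chars.replace cs [sep] [' ']) s.toList := by
    intro l
    induction l with
    | nil => intro s; simp
    | cons a l ih =>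
      intro s
      simp only [List.foldl_cons]
      rw [ih]
      congr 1
      by_cases ha : a ∈ aPrefixes
      · simp [ha]
      · simp [ha, PySem.Str.replace, String.toList_ofList]
  exact this aPunct text

lemma isspace_subst (c : Char) : PySem.Chars.isspace (subst c) = Dl c := by
  simp only [subst, Dl]
  cases h : pdB c
  · simp
  · simp; decide

-- split₀ on the substituted characters computes toks
lemma split_go_toks :
    ∀ (cs cur : List Char) (acc : List (List Char)),
      PySem.Chars.split₀.go (cs.map subst) cur acc
        = acc.reverse ++ toks cur.reverse cs := by
  intro cs
  induction cs with
  | nil =>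
    intro cur acc
    simp only [List.map_nil, PySem.Chars.split₀.go, toks]
    by_cases h : cur.isEmpty
    · have h2 : cur.reverse.isEmpty = true := by
        cases cur <;> simp_all
      rw [if_pos h, h2]; simp
    · have h2 : cur.reverse.isEmpty = false := by
        cases cur <;> simp_all
      rw [if_neg h, h2]; simp
  | cons c cs ih =>
    intro cur acc
    simp only [List.map_cons, PySem.Chars.split₀.go, toks, isspace_subst]
    by_cases hd : Dl c
    · rw [if_pos hd, if_pos hd]
      by_cases he : cur.isEmpty
      · have : cur.reverse.isEmpty = true := by cases cur <;> simp_all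
        rw [if_pos he, if_pos this, ih]; rfl
      · have : cur.reverse.isEmpty = false := by cases cur <;> simp_all
        rw [if_neg he, if_neg (by simp [this]), ih]
        simp
    · rw [if_neg (by simp [hd]), if_neg (by simp [hd])]
      have hc : subst c = c := by
        simp only [subst]
        have : pdB c = false := by
          cases hpd : pdB c
          · rfl
          · exact absurd (by simp [Dl, hpd]) hd
        simp [this]
      rw [hc, ih]
      simp

-- every produced token is nonempty and free of delimiters
lemma toks_props :
    ∀ (cs cur : List Char), (∀ c ∈ cur, Dl c = false) →
      ∀ t ∈ toks cur cs, t ≠ [] ∧ ∀ c ∈ t, Dl c = false := by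
  intro cs
  induction cs with
  | nil =>
    intro cur hcur t ht
    simp only [toks] at ht
    by_cases h : cur.isEmpty
    · rw [if_pos h] at ht; simp at ht
    · rw [if_neg h] at ht
      rcases List.mem_singleton.mp ht with rfl
      exact ⟨by simpa [List.isEmpty_iff] using h, hcur⟩
  | cons c cs ih =>
    intro cur hcur t ht
    simp only [toks] at ht
    by_cases hd : Dl c
    · rw [if_pos hd] at ht
      by_cases he : cur.isEmpty
      · rw [if_pos he] at ht; exact ih [] (by simp) t ht
      · rw [if_neg he] at ht
        rcases List.mem_cons.mp ht with rfl | ht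
        · exact ⟨by simpa [List.isEmpty_iff] using he, hcur⟩
        · exact ih [] (by simp) t ht
    · rw [if_neg (by simp [hd])] at ht
      refine ih (cur ++ [c]) ?_ t ht
      intro x hx
      rcases List.mem_append.mp hx with hx | hx
      · exact hcur x hx
      · rcases List.mem_singleton.mp hx with rfl
        cases h : Dl x
        · rfl
        · exact absurd h (by simp [hd])

lemma dropWhile_of_all_false {p : Char → Bool} :
    ∀ (l : List Char), (∀ c ∈ l, p c = false) → l.dropWhile p = l := by
  intro l h
  cases l with
  | nil => rfl
  | cons c t => simp [h c List.mem_cons_self]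

lemma strip_of_token (t : List Char) (h : ∀ c ∈ t, Dl c = false) :
    PySem.Chars.strip t = t := by
  have hns : ∀ c ∈ t, PySem.Chars.isspace c = false := by
    intro c hc
    cases hs : PySem.Chars.isspace c
    · rfl
    · exact absurd (h c hc) (by simp [Dl, hs])
  simp only [PySem.Chars.strip, PySem.Chars.lstrip, PySem.Chars.rstrip]
  rw [dropWhile_of_all_false t hns]
  rw [dropWhile_of_all_false t.reverse (fun c hc => hns c (List.mem_reverse.mp hc))]
  simp

-- A's word loop on the token list is a filter by bKeep
lemma wordsA_eq (cs : List Char) :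
    ((toks [] cs).map String.ofList).foldl (fun ws w =>
      let w' := PySem.Str.strip w
      if w' ≠ "" then
        match PySem.Str.pyGet? w' 0 with
        | some c => if c ∈ aPrefixes then ws else ws ++ [w']
        | none => ws
      else ws) []
    = ((toks [] cs).filter bKeep).map String.ofList := by
  have hbody : ∀ (ws : List String) (w : String),
      w ∈ (toks [] cs).map String.ofList →
      (let w' := PySem.Str.strip w
       if w' ≠ "" then
         match PySem.Str.pyGet? w' 0 with
         | some c => if c ∈ aPrefixes then ws else ws ++ [w']
         | none => ws
       else ws)
      = (if bKeep w.toList then ws ++ [id w] else ws) := by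
    intro ws w hw
    rcases List.mem_map.mp hw with ⟨t, ht, rfl⟩
    obtain ⟨hne, hall⟩ := toks_props cs [] (by simp) t ht
    have hstrip : PySem.Str.strip (String.ofList t) = String.ofList t := by
      have : (PySem.Str.strip (String.ofList t)).toList = t := by
        simp [PySem.Str.strip, String.toList_ofList, strip_of_token t hall]
      exact String.toList_injective (by simpa [String.toList_ofList] using this)
    rw [hstrip]
    obtain ⟨c, t', rfl⟩ : ∃ c t', t = c :: t' := by
      cases t with
      | nil => exact absurd rfl hne
      | cons c t' => exact ⟨c, t', rfl⟩
    have hnemp : String.ofList (c :: t') ≠ "" := by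
      intro h
      have := congrArg String.toList h
      simp [String.toList_ofList] at this
    rw [if_pos hnemp]
    have hget : PySem.Str.pyGet? (String.ofList (c :: t')) 0 = some c := by
      simp [PySem.Str.pyGet?_eq, String.toList_ofList, PySem.Chars.pyGet?_eq_listPyGet?]
    rw [hget]
    simp only [String.toList_ofList]
    rcases Decidable.em (c = '@' ∨ c = '#') with hc | hc
    · rw [if_pos (show c ∈ aPrefixes by simpa [aPrefixes] using hc)]
      have hb : bKeep (c :: t') = false := by rcases hc with rfl | rfl <;> rfl
      rw [hb]; simp
    · rw [if_neg (show c ∉ aPrefixes by simpa [aPrefixes] using hc)]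
      push_neg at hc
      have hb : bKeep (c :: t') = true := by simp [bKeep, hc.1, hc.2]
      rw [hb]; simp
  rw [PySem.List.foldl_congr_mem _ _ (fun ws w => if bKeep w.toList then ws ++ [id w] else ws) _ hbody]
  refine Eq.trans (PySem.List.foldl_append_if (fun w : String => bKeep w.toList) (id : String → String) _ []) ?_
  simp only [List.filter_map, List.map_map, List.nil_append]
  congr 1
  apply List.filter_congr
  intro t _
  simp [Function.comp, String.toList_ofList]

-- on domain characters, membership in B's delimiter set is Dl
lemma delims_eq (c : Char) (h : pvDomChar c = true) :
    PySem.Set.contains bDelims c = Dl c := by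
  apply Bool.coe_iff_coe.mp
  rw [PySem.Set.contains_iff]
  simp only [bDelims, PySem.Set.mem_union, PySem.Set.mem_diff, PySem.Set.mem_ofList]
  simp only [Dl, pdB, Bool.or_eq_true, Bool.and_eq_true, decide_eq_true_iff,
    Bool.not_eq_true', decide_eq_false_iff_not]
  have hws : c ∈ bWhitespace ↔ (c.toNat = 32 ∨ c.toNat = 9 ∨ c.toNat = 10 ∨ c.toNat = 13 ∨ c.toNat = 11 ∨ c.toNat = 12) := by
    simp only [bWhitespace, List.mem_cons, List.not_mem_nil, or_false, char_eq_iff_toNat,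
      show (' ').toNat = 32 from rfl, show ('\t').toNat = 9 from rfl, show ('\n').toNat = 10 from rfl,
      show ('\r').toNat = 13 from rfl, show ('\x0b').toNat = 11 from rfl, show ('\x0c').toNat = 12 from rfl]
  have hdom : (32 ≤ c.toNat ∧ c.toNat ≤ 126) ∨ c.toNat = 9 ∨ c.toNat = 10 ∨ c.toNat = 13 := by
    have := h
    simp only [pvDomChar, Bool.or_eq_true, Bool.and_eq_true, decide_eq_true_eq,
      beq_iff_eq] at this
    tauto
  have hisspace : PySem.Chars.isspace c = true ↔
      (c.toNat = 32 ∨ c.toNat = 9 ∨ c.toNat = 10 ∨ c.toNat = 13) := by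
    simp only [PySem.Chars.isspace, Bool.or_eq_true, Bool.and_eq_true, decide_eq_true_eq]
    omega
  constructor
  · rintro (hw | ⟨hp, hnp⟩)
    · left; rw [hisspace]; rw [hws] at hw; omega
    · right; exact ⟨hp, hnp⟩
  · rintro (hs | hpd)
    · left
      rw [hisspace] at hs
      rw [hws]
      omega
    · right; exact hpd

-- B's scan computes the filtered tokens
lemma scanB (cs : List Char) :
    ∀ (ws : List String) (cur : List Char), (∀ c ∈ cs, pvDomChar c = true) →
      bFlush (cs.foldl (fun (st : List String × List Char) ch =>
          if PySem.Set.contains bDelims ch then (bFlush st.1 st.2, [])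
          else (st.1, st.2 ++ [ch])) (ws, cur)).1
        (cs.foldl (fun (st : List String × List Char) ch =>
          if PySem.Set.contains bDelims ch then (bFlush st.1 st.2, [])
          else (st.1, st.2 ++ [ch])) (ws, cur)).2
      = ws ++ ((toks cur cs).filter bKeep).map String.ofList := by
  induction cs with
  | nil =>
    intro ws cur _
    simp only [List.foldl_nil, toks]
    by_cases he : cur.isEmpty
    · have hc0 : cur = [] := by cases cur <;> simp_all
      subst hc0
      simp [bFlush, bKeep]
    · rw [if_neg he]
      simp only [bFlush]
      by_cases hk : bKeep cur <;> simp [hk]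
  | cons c cs ih =>
    intro ws cur hdom
    have hc := hdom c List.mem_cons_self
    have hrest : ∀ x ∈ cs, pvDomChar x = true := fun x hx => hdom x (List.mem_cons_of_mem _ hx)
    simp only [List.foldl_cons, delims_eq c hc, toks]
    by_cases hd : Dl c
    · rw [if_pos hd, if_pos hd]
      rw [ih (bFlush ws cur) [] hrest]
      by_cases he : cur.isEmpty
      · have hc0 : cur = [] := by cases cur <;> simp_all
        subst hc0
        simp [bFlush, bKeep]
      · rw [if_neg he]
        simp only [List.filter_cons]
        by_cases hk : bKeep cur
        · simp [bFlush, hk]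
        · simp [bFlush, hk]
    · rw [if_neg (by simp [hd]), if_neg (by simp [hd])]
      exact ih ws (cur ++ [c]) hrest

-- ===== VERDICT (by name: the statement is the Claim_ definition above) =====
theorem strip_all_entities_py_spec : Claim_equal_strip_all_entities_py := by
  intro text hdom
  unfold Spec_strip_all_entities_py
  have hdomc : ∀ c ∈ text.toList, pvDomChar c = true := by
    simpa [Dom_strip_all_entities_py, pvDomStr, List.all_eq_true] using hdom
  have hsplit : PySem.Str.split₀ (aPunct.foldl (fun t sep =>
      if sep ∈ aPrefixes then t else PySem.Str.replace t (String.ofList [sep]) " ") text)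
      = (toks [] text.toList).map String.ofList := by
    simp only [PySem.Str.split₀, foldA_toList, replace_fold_eq_map]
    congr 1
    simpa using split_go_toks text.toList [] []
  have hA : strip_all_entities_py text
      = PySem.Str.join " " (((toks [] text.toList).filter bKeep).map String.ofList) := by
    simp only [strip_all_entities_py, hsplit]
    rw [wordsA_eq]
  have hB : strip_all_entities_py_alt text
      = PySem.Str.join " " (((toks [] text.toList).filter bKeep).map String.ofList) := by
    simp only [strip_all_entities_py_alt]
    rw [scanB text.toList [] [] hdomc]
    simp
  rw [hA, hB]
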